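-- pv_equiv track=rewrite | github.com/timian777/zhongshengjie | core/parsing/chapter_outline_parser.py | _parse_scene
-- ===== SOURCE A (Python) =====
-- from typing import Dict, Any, List, Optional
--
-- def _parse_scene(title: str, body: str) -> Dict[str, Any]:
--     """解析单个场景"""
--     scene = {
--         "title": title,
--         "content": "",
--     }
--
--     # 提取引用块内容（> 开头的行）
--     quote_lines = []
--     in_quote = False
--     for line in body.splitlines():
--         line_stripped = line.strip()
--         if line_stripped.startswith(">"):
--             in_quote = True
--             # 提取引用内容（去除 > 前缀）
--             quote_text = line_stripped[1:].strip()
--             if quote_text: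
--                 quote_lines.append(quote_text)
--         elif in_quote and not line_stripped:
--             # 引用块内的空行保留
--             quote_lines.append("")
--         elif in_quote and line_stripped:
--             # 引用块结束或继续
--             if not line_stripped.startswith(">"):
--                 # 非引用内容，结束当前引用块
--                 break
--
--     # 合并引用内容
--     scene["content"] = "\n".join(quote_lines).strip()
--
--     return scene
-- ===== SOURCE B (Python) =====
-- def _parse_scene(title: str, body: str) -> dict:
--     """解析单个场景 — phase-based: strip, locate block bounds, then one comprehension."""
--     lines = [l.strip() for l in body.splitlines()]
--     start = next((i for i, l in enumerate(lines) if l.startswith(">")), len(lines))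
--     end = next((i for i in range(start, len(lines))
--                 if lines[i] and not lines[i].startswith(">")), len(lines))
--     parts = [l[1:].strip() if l.startswith(">") else ""
--              for l in lines[start:end]
--              if not l.startswith(">") or l[1:].strip()]
--     return {"title": title, "content": "\n".join(parts).strip()}
-- ===== Notes on version B (the rewrite author's own statement) =====
-- stated objective: idiomatic
-- what changed: Replaces A's stateful in_quote flag loop with break by a phase decomposition: strip all lines up front, locate the quote block's start/end indices with two searches, then build the quote texts with a single comprehension over the slice.
import Mathlib
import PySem

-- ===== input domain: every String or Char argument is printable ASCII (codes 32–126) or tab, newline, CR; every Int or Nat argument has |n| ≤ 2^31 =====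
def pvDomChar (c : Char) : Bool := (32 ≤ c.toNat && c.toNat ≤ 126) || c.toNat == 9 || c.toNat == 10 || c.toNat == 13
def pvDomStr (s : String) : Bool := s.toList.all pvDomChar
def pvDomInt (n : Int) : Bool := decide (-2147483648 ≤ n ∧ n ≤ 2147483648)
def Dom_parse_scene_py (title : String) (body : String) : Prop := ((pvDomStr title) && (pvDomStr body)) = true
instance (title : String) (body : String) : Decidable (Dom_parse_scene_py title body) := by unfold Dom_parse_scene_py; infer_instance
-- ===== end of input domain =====

-- B replaces A's in_quote-flag loop with explicit phases (strip lines, find block bounds, one comprehension); same cost, plainer structure.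

-- ===== PORT A =====
-- the for-loop over body.splitlines() with quote_lines/in_quote state and break
def pvQuoteLoopA : List String → List String → Bool → List String
  | [], acc, _ => acc
  | line :: rest, acc, inq =>
    let s := PySem.Str.strip line
    if PySem.Str.startswith s ">" then
      let qt := PySem.Str.strip (PySem.Str.slice s (some 1) none)
      pvQuoteLoopA rest (if qt ≠ "" then acc ++ [qt] else acc) true
    else if inq && (s == "") then
      pvQuoteLoopA rest (acc ++ [""]) inq
    else if inq && !(s == "") then
      if !(PySem.Str.startswith s ">") then acc   -- break
      else pvQuoteLoopA rest acc inq
    else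
      pvQuoteLoopA rest acc inq

def parse_scene_py (title : String) (body : String) : List (String × String) :=
  let scene := (PySem.Dict.empty.insert "title" title).insert "content" ""
  let quote_lines := pvQuoteLoopA (PySem.Str.splitlines body) [] false
  let scene := scene.insert "content" (PySem.Str.strip (PySem.Str.join "\n" quote_lines))
  scene.items

-- ===== PORT B =====
def pvIsQ (l : String) : Bool := PySem.Str.startswith l ">"
def pvStop (l : String) : Bool := !(l == "") && !(PySem.Str.startswith l ">")

def parse_scene_py_alt (title : String) (body : String) : List (String × String) :=
  let lines := (PySem.Str.splitlines body).map PySem.Str.strip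
  let start := (lines.findIdx? pvIsQ).getD lines.length
  let stop := match (lines.drop start).findIdx? pvStop with
    | some j => start + j
    | none => lines.length
  let block := (lines.drop start).take (stop - start)
  let parts := block.filterMap (fun l =>
    if pvIsQ l then
      (let t := PySem.Str.strip (PySem.Str.slice l (some 1) none)
       if t ≠ "" then some t else none)
    else some "")
  [("title", title), ("content", PySem.Str.strip (PySem.Str.join "\n" parts))]

-- ===== PRECONDITION & SPEC =====
def Spec_parse_scene_py (title : String) (body : String) (out : List (String × String)) : Prop := out = parse_scene_py_alt title body
instance (title : String) (body : String) (out : List (String × String)) : Decidable (Spec_parse_scene_py title body out) := by unfold Spec_parse_scene_py; infer_instance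

-- ===== CLAIM (what is proved, stated in full; the proofs are below) =====
def Claim_equal_parse_scene_py : Prop := ∀ (title : String) (body : String), Dom_parse_scene_py title body → Spec_parse_scene_py title body (parse_scene_py title body)

-- ===== LEMMAS AND PROOFS =====

def pvF (l : String) : Option String :=
  if pvIsQ l then
    (let t := PySem.Str.strip (PySem.Str.slice l (some 1) none)
     if t ≠ "" then some t else none)
  else some ""

-- A's loop, once every line has been stripped
def pvLoopS : List String → List String → Bool → List String
  | [], acc, _ => acc
  | s :: rest, acc, inq =>
    if PySem.Str.startswith s ">" then
      let qt := PySem.Str.strip (PySem.Str.slice s (some 1) none)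
      pvLoopS rest (if qt ≠ "" then acc ++ [qt] else acc) true
    else if inq && (s == "") then
      pvLoopS rest (acc ++ [""]) inq
    else if inq && !(s == "") then acc
    else pvLoopS rest acc inq

lemma loopA_eq_loopS (ls acc : List String) (inq : Bool) :
    pvQuoteLoopA ls acc inq = pvLoopS (ls.map PySem.Str.strip) acc inq := by
  induction ls generalizing acc inq with
  | nil => rfl
  | cons l rest ih =>
    simp only [pvQuoteLoopA, List.map_cons, pvLoopS]
    split_ifs <;> simp_all [ih]

lemma loopS_true (ls : List String) (acc : List String) :
    pvLoopS ls acc true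
      = acc ++ (ls.takeWhile (fun l => !pvStop l)).filterMap pvF := by
  induction ls generalizing acc with
  | nil => simp [pvLoopS]
  | cons l rest ih =>
    by_cases hq : PySem.Str.startswith l ">"
    · have hq' : PySem.Chars.startswith l.toList ['>'] = true := by simpa using hq
      simp only [pvLoopS, hq, if_true, ih]
      have hns : pvStop l = false := by simp [pvStop, hq']
      simp [List.takeWhile_cons, hns, pvF, pvIsQ, hq, hq', List.filterMap_cons]
      split_ifs <;> simp_all
    · by_cases he : l = ""
      · subst he
        have : PySem.Str.startswith "" ">" = false := by decide
        simp only [pvLoopS, this, Bool.false_eq_true, if_false, ih]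
        simp [List.takeWhile_cons, pvStop, pvF, pvIsQ, this, List.filterMap_cons, PySem.Chars.startswith]
      · have hq' : PySem.Chars.startswith l.toList ['>'] = false := by
          simpa using hq
        have hstop : pvStop l = true := by simp [pvStop, he, hq']
        simp only [pvLoopS, hq, Bool.false_eq_true, if_false]
        have hne : (l == "") = false := by simp [he]
        simp [hne, hq, List.takeWhile_cons, hstop]

lemma loopS_false (ls : List String) :
    pvLoopS ls [] false
      = ((ls.dropWhile (fun l => !pvIsQ l)).takeWhile (fun l => !pvStop l)).filterMap pvF := by
  induction ls with
  | nil => simp [pvLoopS]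
  | cons l rest ih =>
    by_cases hq : PySem.Str.startswith l ">"
    · have hq' : PySem.Chars.startswith l.toList ['>'] = true := by simpa using hq
      have hqd : pvIsQ l = true := hq
      simp only [pvLoopS, hq, if_true]
      rw [loopS_true]
      have hns : pvStop l = false := by simp [pvStop, hq']
      simp [List.dropWhile_cons, hqd, List.takeWhile_cons, hns, pvF, pvIsQ, hq, hq', List.filterMap_cons]
      split_ifs <;> simp_all
    · have hqd : pvIsQ l = false := by simpa [pvIsQ] using hq
      simp only [pvLoopS, hq, Bool.false_eq_true, if_false, Bool.false_and,
        Bool.and_self, ih]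
      simp [List.dropWhile_cons, hqd]

-- B's index search = dropWhile / takeWhile
lemma drop_findIdx?_getD (p : String → Bool) (ls : List String) :
    ls.drop ((ls.findIdx? p).getD ls.length) = ls.dropWhile (fun l => !p l) := by
  induction ls with
  | nil => simp
  | cons l rest ih =>
    by_cases hp : p l
    · simp [List.findIdx?_cons, hp, List.dropWhile_cons]
    · simp only [List.findIdx?_cons, hp, Bool.false_eq_true, if_false]
      cases h : rest.findIdx? p with
      | none => simp [h, List.dropWhile_cons, hp] at ih ⊢; exact ih
      | some j => simp [h, List.dropWhile_cons, hp] at ih ⊢; exact ih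

lemma take_findIdx?_getD (p : String → Bool) (ls : List String) :
    ls.take ((ls.findIdx? p).getD ls.length) = ls.takeWhile (fun l => !p l) := by
  induction ls with
  | nil => simp
  | cons l rest ih =>
    by_cases hp : p l
    · simp [List.findIdx?_cons, hp, List.takeWhile_cons]
    · simp only [List.findIdx?_cons, hp, Bool.false_eq_true, if_false]
      cases h : rest.findIdx? p with
      | none => simp [h, List.takeWhile_cons, hp] at ih ⊢; exact ih
      | some j => simp [h, List.takeWhile_cons, hp] at ih ⊢; exact ih

lemma block_eq (ls : List String) :
    (let start := (ls.findIdx? pvIsQ).getD ls.length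
     let stop := match (ls.drop start).findIdx? pvStop with
       | some j => start + j
       | none => ls.length
     (ls.drop start).take (stop - start))
    = ((ls.dropWhile (fun l => !pvIsQ l)).takeWhile (fun l => !pvStop l)) := by
  simp only
  set start := (ls.findIdx? pvIsQ).getD ls.length with hstart
  rw [← drop_findIdx?_getD pvIsQ ls]
  cases h : (ls.drop start).findIdx? pvStop with
  | none =>
    have hle : start ≤ ls.length := by
      cases hfi : ls.findIdx? pvIsQ with
      | none => simp [hstart, hfi]
      | some j =>
        have := List.findIdx?_eq_some_iff_findIdx_eq.mp hfi
        simp [hstart, hfi]; omega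
    have hlen : (ls.drop start).length = ls.length - start := by simp
    have := take_findIdx?_getD pvStop (ls.drop start)
    rw [h] at this
    simpa [hlen] using this
  | some j =>
    have := take_findIdx?_getD pvStop (ls.drop start)
    rw [h] at this
    simpa [Nat.add_sub_cancel_left] using this

-- ===== VERDICT (by name: the statement is the Claim_ definition above) =====
theorem parse_scene_py_spec : Claim_equal_parse_scene_py := by
  intro title body _
  unfold Spec_parse_scene_py parse_scene_py parse_scene_py_alt
  simp only
  rw [block_eq]
  rw [loopA_eq_loopS, loopS_false]
  rfl
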